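-- pv_equiv track=rewrite | github.com/michaelrinos/CheckIO | Incinerator/bird-language.py | recurse
-- ===== SOURCE A (Python) =====
-- VOWELS = "aeiouy"
--
-- def recurse(phrase, result):
--     if not phrase:
--         return result
--     else:
--         result += phrase[0]
--         if phrase[0] == " ":
--             return recurse(phrase[1:],result)
--         elif phrase[0] in VOWELS:
--             return recurse(phrase[3:],result)
--         else:
--             return recurse(phrase[2:],result)
-- ===== SOURCE B (Python) =====
-- VOWELS = "aeiouy"
--
-- def recurse(phrase, result):
--     i = 0
--     while i < len(phrase):
--         c = phrase[i]
--         result += c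
--         if c == " ":
--             i += 1
--         elif c in VOWELS:
--             i += 3
--         else:
--             i += 2
--     return result
-- ===== Notes on version B (the rewrite author's own statement) =====
-- stated objective: faster
-- what changed: Replaced the tail recursion that copies a suffix slice of the phrase on every call (quadratic) with a single iterative index-pointer loop over the original string (advance by 1/3/2), no slicing.
import Mathlib
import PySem

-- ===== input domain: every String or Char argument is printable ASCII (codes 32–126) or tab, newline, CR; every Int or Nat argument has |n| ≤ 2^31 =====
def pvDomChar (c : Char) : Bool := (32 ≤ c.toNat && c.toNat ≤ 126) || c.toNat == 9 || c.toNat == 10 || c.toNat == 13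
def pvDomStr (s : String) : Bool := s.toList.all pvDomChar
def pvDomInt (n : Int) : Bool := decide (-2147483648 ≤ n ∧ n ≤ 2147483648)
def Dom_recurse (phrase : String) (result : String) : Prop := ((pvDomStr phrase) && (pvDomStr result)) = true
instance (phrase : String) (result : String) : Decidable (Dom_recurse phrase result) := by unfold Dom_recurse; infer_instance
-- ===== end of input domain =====

-- B re-implements A's tail recursion (which slices the remaining phrase) as an iterative
-- index-pointer loop over the original string; same return value, idiomatic objective.

-- VOWELS = "aeiouy" (module constant used by both versions)
def pyVOWELS : List Char := "aeiouy".toList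

-- ===== PORT A =====
-- A's recursion on the phrase: append phrase[0], recurse on phrase[1:]/[3:]/[2:].
def recurseA (phrase : List Char) (result : List Char) : List Char :=
  match phrase with
  | [] => result
  | c :: rest =>
    if c == ' ' then recurseA rest (result ++ [c])
    else if pyVOWELS.contains c then recurseA (rest.drop 2) (result ++ [c])
    else recurseA (rest.drop 1) (result ++ [c])
termination_by phrase.length
decreasing_by
  · simp
  · simpa using Nat.lt_succ_of_le (Nat.sub_le _ _)
  · simpa using Nat.lt_succ_of_le (Nat.sub_le _ _)

def recurse (phrase : String) (result : String) : String :=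
  String.ofList (recurseA phrase.toList result.toList)

-- ===== PORT B =====
-- B's while-loop: index i, append phrase[i], advance i by 1 / 3 / 2.
def recurseB (phrase : List Char) (i : Nat) (result : List Char) : List Char :=
  if h : i < phrase.length then
    let c := phrase[i]
    if c == ' ' then recurseB phrase (i + 1) (result ++ [c])
    else if pyVOWELS.contains c then recurseB phrase (i + 3) (result ++ [c])
    else recurseB phrase (i + 2) (result ++ [c])
  else result
termination_by phrase.length - i
decreasing_by all_goals omega

def recurse_alt (phrase : String) (result : String) : String :=
  String.ofList (recurseB phrase.toList 0 result.toList)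

-- ===== PRECONDITION & SPEC =====
def Spec_recurse (phrase : String) (result : String) (out : String) : Prop := out = recurse_alt phrase result
instance (phrase : String) (result : String) (out : String) : Decidable (Spec_recurse phrase result out) := by unfold Spec_recurse; infer_instance

-- ===== CLAIM (what is proved, stated in full; the proofs are below) =====
def Claim_equal_recurse : Prop := ∀ (phrase : String) (result : String), Dom_recurse phrase result → Spec_recurse phrase result (recurse phrase result)

-- ===== LEMMAS AND PROOFS =====

-- B's loop from index i computes A's recursion on the suffix phrase.drop i.
theorem recurseB_eq_recurseA (phrase : List Char) (i : Nat) (result : List Char) :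
    recurseB phrase i result = recurseA (phrase.drop i) result := by
  induction hn : phrase.length - i using Nat.strong_induction_on generalizing i result with
  | _ n ih =>
    by_cases h : i < phrase.length
    · have hdrop : phrase.drop i = phrase[i] :: phrase.drop (i + 1) :=
        List.drop_eq_getElem_cons h
      rw [recurseB, dif_pos h, recurseA.eq_def, hdrop]
      have h13 : (phrase.drop (i + 1)).drop 2 = phrase.drop (i + 3) := by
        rw [List.drop_drop]
      have h12 : (phrase.drop (i + 1)).drop 1 = phrase.drop (i + 2) := by
        rw [List.drop_drop]
      dsimp only
      split_ifs with h1 h2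
      · exact ih (phrase.length - (i + 1)) (by omega) _ _ rfl
      · rw [h13]; exact ih (phrase.length - (i + 3)) (by omega) _ _ rfl
      · rw [h12]; exact ih (phrase.length - (i + 2)) (by omega) _ _ rfl
    · rw [recurseB, dif_neg h, List.drop_eq_nil_of_le (by omega), recurseA]

-- ===== VERDICT (by name: the statement is the Claim_ definition above) =====
theorem recurse_spec : Claim_equal_recurse := by
  intro phrase result _
  unfold Spec_recurse recurse recurse_alt
  rw [recurseB_eq_recurseA, List.drop_zero]
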